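-- pv_equiv track=rewrite | github.com/paiml/depyler | examples/hard_zigzag_patterns.py | zigzag_order
-- ===== SOURCE A (Python) =====
-- def zigzag_order(arr: list[int], num_rows: int) -> list[int]:
--     """Arrange elements in zigzag pattern across rows."""
--     if num_rows <= 1 or len(arr) == 0:
--         result: list[int] = []
--         for v in arr:
--             result.append(v)
--         return result
--     rows: list[list[int]] = []
--     r: int = 0
--     while r < num_rows:
--         rows.append([])
--         r += 1
--     current_row: int = 0
--     going_down: int = 1
--     for val in arr:
--         rows[current_row].append(val)
--         if current_row == 0:
--             going_down = 1
--         if current_row == num_rows - 1: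
--             going_down = 0
--         if going_down == 1:
--             current_row += 1
--         else:
--             current_row -= 1
--     result2: list[int] = []
--     for row in rows:
--         for v in row:
--             result2.append(v)
--     return result2
-- ===== SOURCE B (Python) =====
-- def zigzag_order(arr: list[int], num_rows: int) -> list[int]:
--     """Arrange elements in zigzag pattern across rows (closed-form row assignment)."""
--     if num_rows <= 1 or len(arr) == 0:
--         return list(arr)
--     cycle = 2 * (num_rows - 1)
--     rows = [[] for _ in range(num_rows)]
--     for i, v in enumerate(arr):
--         p = i % cycle
--         rows[p if p < num_rows else cycle - p].append(v)
--     return [v for row in rows for v in row]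
-- ===== Notes on version B (the rewrite author's own statement) =====
-- stated objective: alternative
-- what changed: Replaced A's stateful up/down row-pointer simulation (current_row/going_down state machine) by a closed-form modular row assignment: element i goes to row p if p < num_rows else cycle - p with p = i % (2*(num_rows-1)), buckets filled in one pass over enumerate(arr).
import Mathlib
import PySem

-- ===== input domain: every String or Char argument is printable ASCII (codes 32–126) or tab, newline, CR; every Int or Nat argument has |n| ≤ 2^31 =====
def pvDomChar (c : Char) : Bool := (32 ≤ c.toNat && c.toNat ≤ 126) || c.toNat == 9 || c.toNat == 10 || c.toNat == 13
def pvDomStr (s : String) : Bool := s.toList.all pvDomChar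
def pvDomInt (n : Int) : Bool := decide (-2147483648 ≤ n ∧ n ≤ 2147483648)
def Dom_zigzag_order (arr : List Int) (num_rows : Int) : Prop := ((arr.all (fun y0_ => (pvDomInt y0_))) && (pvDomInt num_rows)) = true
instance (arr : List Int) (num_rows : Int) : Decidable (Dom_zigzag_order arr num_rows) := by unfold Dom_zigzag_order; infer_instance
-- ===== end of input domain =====

-- B replaces A's up/down row-pointer state machine by a closed-form modular row
-- assignment (alternative decomposition, same cost); return value only, no mutation.

-- ===== PORT A =====
-- the 'while r < num_rows: rows.append([])' loop of A
def zigzagBuildRows (num_rows r : Int) (rows : List (List Int)) : List (List Int) :=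
  if r < num_rows then zigzagBuildRows num_rows (r + 1) (rows ++ [[]]) else rows
termination_by (num_rows - r).toNat
decreasing_by omega

-- the body of A's main 'for val in arr' loop; state = (rows, current_row, going_down);
-- current_row stays in [0, num_rows), so '.toNat' on it is exact (Python never indexes negatively here)
def zzA (num_rows : Int) (s : List (List Int) × Int × Int) (val : Int) :
    List (List Int) × Int × Int :=
  let rows' := s.1.modify s.2.1.toNat (fun row => row ++ [val])
  let gd1 := if s.2.1 = 0 then 1 else s.2.2
  let gd2 := if s.2.1 = num_rows - 1 then 0 else gd1
  if gd2 = 1 then (rows', s.2.1 + 1, gd2) else (rows', s.2.1 - 1, gd2)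

def zigzag_order (arr : List Int) (num_rows : Int) : List Int :=
  if num_rows ≤ 1 ∨ arr.length = 0 then
    arr.foldl (fun result v => result ++ [v]) []
  else
    let rows := zigzagBuildRows num_rows 0 []
    let s := arr.foldl (zzA num_rows) (rows, 0, 1)
    s.1.foldl (fun result2 row => row.foldl (fun r v => r ++ [v]) result2) []

-- ===== PORT B =====
-- the body of B's 'for i, v in enumerate(arr)' loop (cycle = 2*(num_rows-1) inlined)
def zzB (num_rows : Int) (rows : List (List Int)) (iv : Int × Int) : List (List Int) :=
  let p := PySem.Int.mod iv.1 (2 * (num_rows - 1))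
  rows.modify (if p < num_rows then p else 2 * (num_rows - 1) - p).toNat
    (fun row => row ++ [iv.2])

def zigzag_order_alt (arr : List Int) (num_rows : Int) : List Int :=
  if num_rows ≤ 1 ∨ arr.length = 0 then arr
  else
    let rows0 := (List.range num_rows.toNat).map (fun _ => ([] : List Int))
    let rows := (PySem.List.enumerate arr).foldl (zzB num_rows) rows0
    rows.foldl (fun acc row => acc ++ row) []

-- ===== PRECONDITION & SPEC =====
def Spec_zigzag_order (arr : List Int) (num_rows : Int) (out : List Int) : Prop := out = zigzag_order_alt arr num_rows
instance (arr : List Int) (num_rows : Int) (out : List Int) : Decidable (Spec_zigzag_order arr num_rows out) := by unfold Spec_zigzag_order; infer_instance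

-- ===== CLAIM (what is proved, stated in full; the proofs are below) =====
def Claim_equal_zigzag_order : Prop := ∀ (arr : List Int) (num_rows : Int), Dom_zigzag_order arr num_rows → Spec_zigzag_order arr num_rows (zigzag_order arr num_rows)

-- ===== LEMMAS AND PROOFS =====

lemma zz_emod_succ (a n : Int) (hn : 0 < n) :
    (a + 1) % n = if a % n = n - 1 then 0 else a % n + 1 := by
  have h1 : 0 ≤ a % n := Int.emod_nonneg _ (by omega)
  have h2 : a % n < n := Int.emod_lt_of_pos _ hn
  have ha : a + 1 = (a % n + 1) + n * (a / n) := by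
    have := Int.emod_add_mul_ediv a n; omega
  rw [ha, Int.add_mul_emod_self_left]
  split_ifs with h
  · have : a % n + 1 = n := by omega
    rw [this, Int.emod_self]
  · exact Int.emod_eq_of_lt (by omega) (by omega)

-- the closed-form row index B uses
def zzRow (nr i : Int) : Int :=
  if i % (2 * (nr - 1)) < nr then i % (2 * (nr - 1)) else 2 * (nr - 1) - i % (2 * (nr - 1))

-- invariant on A's going_down flag before processing index i
def zzInv (nr i gd : Int) : Prop :=
  i % (2 * (nr - 1)) = 0 ∨ gd = (if i % (2 * (nr - 1)) < nr then 1 else 0)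

lemma zz_step (nr i gd : Int) (h2 : 2 ≤ nr) (hgd : zzInv nr i gd) :
    (if (if zzRow nr i = nr - 1 then 0 else if zzRow nr i = 0 then 1 else gd) = 1
      then zzRow nr i + 1 else zzRow nr i - 1) = zzRow nr (i + 1)
    ∧ zzInv nr (i + 1) (if zzRow nr i = nr - 1 then 0 else if zzRow nr i = 0 then 1 else gd) := by
  have hc : 0 < 2 * (nr - 1) := by omega
  have hp0 : 0 ≤ i % (2 * (nr - 1)) := Int.emod_nonneg _ (by omega)
  have hp1 : i % (2 * (nr - 1)) < 2 * (nr - 1) := Int.emod_lt_of_pos _ hc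
  unfold zzRow zzInv at *
  rw [zz_emod_succ _ _ hc]
  split_ifs <;> omega

lemma zz_fold (nr : Int) (h2 : 2 ≤ nr) :
    ∀ (l : List Int) (i gd : Int) (rows : List (List Int)), 0 ≤ i → zzInv nr i gd →
      (l.foldl (zzA nr) (rows, zzRow nr i, gd)).1
        = (PySem.List.enumerate l i).foldl (zzB nr) rows := by
  intro l
  induction l with
  | nil => intro i gd rows _ _; simp [PySem.List.enumerate_nil]
  | cons v t ih =>
    intro i gd rows hi hgd
    have hstep := zz_step nr i gd h2 hgd
    have hmod : PySem.Int.mod (i : Int) (2 * (nr - 1)) = i % (2 * (nr - 1)) :=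
      PySem.Int.mod_eq_emod_of_pos (by omega)
    rw [PySem.List.enumerate_cons]
    simp only [List.foldl_cons]
    have hB : zzB nr rows (i, v) = rows.modify (zzRow nr i).toNat (fun row => row ++ [v]) := by
      simp only [zzB, hmod, zzRow]
    have hA : zzA nr (rows, zzRow nr i, gd) v
        = (rows.modify (zzRow nr i).toNat (fun row => row ++ [v]), zzRow nr (i + 1),
           if zzRow nr i = nr - 1 then 0 else if zzRow nr i = 0 then 1 else gd) := by
      simp only [zzA]
      rw [← hstep.1]
      split_ifs <;> rfl
    rw [hB, hA]
    exact ih (i + 1) _ _ (by omega) hstep.2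

lemma zz_buildRows (nr : Int) : ∀ (k : Nat) (r : Int), (nr - r).toNat = k →
    ∀ (rows : List (List Int)),
      zigzagBuildRows nr r rows = rows ++ List.replicate k [] := by
  intro k
  induction k with
  | zero =>
    intro r hr rows
    rw [zigzagBuildRows, if_neg (by omega)]
    simp
  | succ k ih =>
    intro r hr rows
    rw [zigzagBuildRows, if_pos (by omega), ih (r + 1) (by omega)]
    simp [List.replicate_succ]

lemma zz_flatten : ∀ (rows : List (List Int)) (acc : List Int),
    rows.foldl (fun result2 row => row.foldl (fun r v => r ++ [v]) result2) acc
      = rows.foldl (fun acc row => acc ++ row) acc := by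
  intro rows
  induction rows with
  | nil => intro acc; rfl
  | cons r t ih =>
    intro acc
    simp only [List.foldl_cons, PySem.List.foldl_append_singleton]

-- ===== VERDICT (by name: the statement is the Claim_ definition above) =====
theorem zigzag_order_spec : Claim_equal_zigzag_order := by
  intro arr nr _
  unfold Spec_zigzag_order zigzag_order zigzag_order_alt
  split_ifs with h
  · exact PySem.List.foldl_append_singleton arr []
  · have h2 : 2 ≤ nr := by rcases not_or.mp h with ⟨h1, _⟩; omega
    have hfold := zz_fold nr h2 arr 0 1
      ((List.range nr.toNat).map (fun _ => ([] : List Int))) le_rfl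
      (Or.inl (by rw [Int.zero_emod]))
    have h0 : zzRow nr 0 = 0 := by
      unfold zzRow; rw [Int.zero_emod, if_pos (by omega)]
    rw [h0] at hfold
    have hrows : zigzagBuildRows nr 0 []
        = (List.range nr.toNat).map (fun _ => ([] : List Int)) := by
      rw [zz_buildRows nr nr.toNat 0 (by omega)]
      simp
    simp only [hrows]
    rw [zz_flatten, hfold]
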